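-- pv_equiv track=rewrite | github.com/samscloud/Recognition-AEB-Facial | src/processor/face_tracking.py | sort_dict_keys
-- ===== SOURCE A (Python) =====
-- def sort_dict_keys(d):
--     def sorting_key(key):
--         try:
--             return (0, int(key))  # (0, integer value) for keys that can be converted to integers
--         except ValueError:
--             return (1, key)  # (1, string value) for keys that cannot be converted to integers
--
--     sorted_keys = sorted(d.keys(), key=sorting_key)
--     sorted_dict = {k: d[k] for k in sorted_keys}
--     return sorted_dict
-- ===== SOURCE B (Python) =====
-- def sort_dict_keys(d):
--     ints = []
--     strs = []
--     for k in d: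
--         try:
--             ints.append((int(k), k))
--         except ValueError:
--             strs.append(k)
--     ints.sort(key=lambda p: p[0])
--     strs.sort()
--     return {k: d[k] for k in [p[1] for p in ints] + strs}
-- ===== Notes on version B (the rewrite author's own statement) =====
-- stated objective: alternative
-- what changed: Replaces the single stable sort with a composite (tag, value) key by a one-pass partition of the keys into an int group and a string group, each sorted separately with a plain key, then concatenated (ints first).
import Mathlib
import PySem

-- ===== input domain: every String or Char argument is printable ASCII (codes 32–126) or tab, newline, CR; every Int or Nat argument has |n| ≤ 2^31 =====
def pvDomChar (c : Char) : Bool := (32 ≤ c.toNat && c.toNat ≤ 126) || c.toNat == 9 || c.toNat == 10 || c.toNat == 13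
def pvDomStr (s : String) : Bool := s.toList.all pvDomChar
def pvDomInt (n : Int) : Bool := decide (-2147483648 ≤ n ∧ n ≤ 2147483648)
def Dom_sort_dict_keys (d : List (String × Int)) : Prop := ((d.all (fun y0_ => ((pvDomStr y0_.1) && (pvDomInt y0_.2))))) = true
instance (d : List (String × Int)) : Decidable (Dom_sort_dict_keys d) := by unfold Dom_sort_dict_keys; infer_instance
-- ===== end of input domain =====

-- B replaces A's single composite-key stable sort by a one-pass partition into an int group
-- and a string group, each sorted separately and concatenated (objective: alternative decomposition).

-- ===== PORT A =====
-- sorting_key(a) < sorting_key(b): Python tuple comparison of (0, int(k)) / (1, k),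
-- compared explicitly since the key codomain is heterogeneous.
def pvKeyLt (a b : String) : Bool :=
  match PySem.Int.ofStr? a, PySem.Int.ofStr? b with
  | some n, some m => decide (n < m)
  | some _, none => true
  | none, some _ => false
  | none, none => decide (a < b)

def sort_dict_keys (d : List (String × Int)) : List (String × Int) :=
  let dd := PySem.Dict.ofList d
  -- sorted(d.keys(), key=sorting_key): stable insertion sort with the explicit key comparison
  let sortedKeys := dd.keys.foldl (fun acc k => PySem.List.insertBy pvKeyLt k acc) []
  -- {k: d[k] for k in sorted_keys}; every k is a key of dd, so get? succeeds
  sortedKeys.map (fun k => (k, (dd.get? k).getD 0))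

-- ===== PORT B =====
-- the loop over the keys: append (int(k), k) to ints on success, k to strs on ValueError
def pvPartition (ks : List String) : List (Int × String) × List String :=
  match ks with
  | [] => ([], [])
  | k :: rest =>
    let p := pvPartition rest
    match PySem.Int.ofStr? k with
    | some n => ((n, k) :: p.1, p.2)
    | none => (p.1, k :: p.2)

def sort_dict_keys_alt (d : List (String × Int)) : List (String × Int) :=
  let dd := PySem.Dict.ofList d
  let p := pvPartition dd.keys
  let ints := PySem.List.sorted p.1 (fun q => q.1)
  let strs := PySem.List.sorted p.2 (fun s => s)
  (ints.map (fun q => q.2) ++ strs).map (fun k => (k, (dd.get? k).getD 0))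

-- ===== PRECONDITION & SPEC =====
def Spec_sort_dict_keys (d : List (String × Int)) (out : List (String × Int)) : Prop := out = sort_dict_keys_alt d
instance (d : List (String × Int)) (out : List (String × Int)) : Decidable (Spec_sort_dict_keys d out) := by unfold Spec_sort_dict_keys; infer_instance

-- ===== CLAIM (what is proved, stated in full; the proofs are below) =====
def Claim_equal_sort_dict_keys : Prop := ∀ (d : List (String × Int)), Dom_sort_dict_keys d → Spec_sort_dict_keys d (sort_dict_keys d)

-- ===== LEMMAS AND PROOFS =====

theorem insertBy_append_right {α : Type} (before : α → α → Bool) (x : α) (I S : List α)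
    (h : ∀ i ∈ I, before x i = false) :
    PySem.List.insertBy before x (I ++ S) = I ++ PySem.List.insertBy before x S := by
  induction I with
  | nil => simp
  | cons i I ih =>
    have hi := h i (by simp)
    simp [PySem.List.insertBy, hi]
    exact ih (fun j hj => h j (by simp [hj]))

theorem insertBy_append_left {α : Type} (before : α → α → Bool) (x : α) (I S : List α)
    (h : ∀ s ∈ S, before x s = true) :
    PySem.List.insertBy before x (I ++ S) = PySem.List.insertBy before x I ++ S := by
  induction I with
  | nil =>
    cases S with
    | nil => simp
    | cons s S => simp [PySem.List.insertBy, h s (by simp)]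
  | cons i I ih =>
    by_cases hb : before x i = true
    · simp [PySem.List.insertBy, hb]
    · simp only [List.cons_append, PySem.List.insertBy, eq_false_of_ne_true hb, if_false,
        Bool.false_eq_true]
      simp [ih]

theorem partition_append (ks : List String) (k : String) :
    pvPartition (ks ++ [k]) =
      match PySem.Int.ofStr? k with
      | some n => ((pvPartition ks).1 ++ [(n, k)], (pvPartition ks).2)
      | none => ((pvPartition ks).1, (pvPartition ks).2 ++ [k]) := by
  induction ks with
  | nil => cases hk : PySem.Int.ofStr? k <;> simp [pvPartition, hk]
  | cons a ks ih =>
    cases hk : PySem.Int.ofStr? k <;> cases ha : PySem.Int.ofStr? a <;>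
      simp_all [pvPartition]

theorem partition_inv (ks : List String) :
    (∀ p ∈ (pvPartition ks).1, PySem.Int.ofStr? p.2 = some p.1) ∧
    (∀ s ∈ (pvPartition ks).2, PySem.Int.ofStr? s = none) := by
  induction ks with
  | nil => simp [pvPartition]
  | cons a ks ih =>
    cases ha : PySem.Int.ofStr? a <;>
      simpa [pvPartition, ha] using ih

theorem sorted_append_one {α κ : Type} [LT κ] [DecidableLT κ] (xs : List α) (x : α) (key : α → κ) :
    PySem.List.sorted (xs ++ [x]) key =
      PySem.List.insertBy (fun a b => decide (key a < key b)) x (PySem.List.sorted xs key) := by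
  rw [PySem.List.sorted_eq_foldl_insertBy, PySem.List.sorted_eq_foldl_insertBy,
    List.foldl_append]
  simp

theorem map_insertBy_int (n : Int) (k : String) (I : List (Int × String))
    (hk : PySem.Int.ofStr? k = some n)
    (hI : ∀ p ∈ I, PySem.Int.ofStr? p.2 = some p.1) :
    (PySem.List.insertBy (fun a b => decide (a.1 < b.1)) (n, k) I).map (fun q => q.2) =
      PySem.List.insertBy pvKeyLt k (I.map (fun q => q.2)) := by
  induction I with
  | nil => simp [PySem.List.insertBy]
  | cons p I ih =>
    have hp := hI p (by simp)
    by_cases hlt : n < p.1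
    · simp [PySem.List.insertBy, pvKeyLt, hk, hp, hlt]
    · simp only [PySem.List.insertBy, decide_eq_true_eq, hlt, if_false, List.map_cons,
        pvKeyLt, hk, hp, List.map]
      simp [ih (fun q hq => hI q (by simp [hq]))]

theorem insertBy_str (k : String) (S : List String)
    (hk : PySem.Int.ofStr? k = none)
    (hS : ∀ s ∈ S, PySem.Int.ofStr? s = none) :
    PySem.List.insertBy pvKeyLt k S =
      PySem.List.insertBy (fun a b => decide (a < b)) k S := by
  induction S with
  | nil => simp [PySem.List.insertBy]
  | cons s S ih =>
    have hs := hS s (by simp)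
    simp only [PySem.List.insertBy, pvKeyLt, hk, hs]
    rw [ih (fun t ht => hS t (by simp [ht]))]

theorem main_order (ks : List String) :
    ks.foldl (fun acc k => PySem.List.insertBy pvKeyLt k acc) [] =
      (PySem.List.sorted (pvPartition ks).1 (fun q => q.1)).map (fun q => q.2) ++
        PySem.List.sorted (pvPartition ks).2 (fun s => s) := by
  induction ks using List.reverseRecOn with
  | nil => simp [pvPartition, PySem.List.sorted]
  | append_singleton ks k ih =>
    rw [List.foldl_append, List.foldl_cons, List.foldl_nil, ih]
    obtain ⟨hInt, hStr⟩ := partition_inv ks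
    cases hk : PySem.Int.ofStr? k with
    | some n =>
      rw [partition_append]
      simp only [hk]
      rw [sorted_append_one]
      rw [insertBy_append_left pvKeyLt k _ _ (by
        intro s hs
        have : PySem.Int.ofStr? s = none := by
          apply hStr
          exact (PySem.List.sorted_perm _ _ _).mem_iff.mp hs
        simp [pvKeyLt, hk, this])]
      rw [map_insertBy_int n k _ hk (fun p hp => hInt p ((PySem.List.sorted_perm _ _ _).mem_iff.mp hp))]
    | none =>
      rw [partition_append]
      simp only [hk]
      rw [sorted_append_one]
      rw [insertBy_append_right pvKeyLt k _ _ (by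
        intro i hi
        simp only [List.mem_map] at hi
        obtain ⟨p, hp, rfl⟩ := hi
        have : PySem.Int.ofStr? p.2 = some p.1 :=
          hInt p ((PySem.List.sorted_perm _ _ _).mem_iff.mp hp)
        simp [pvKeyLt, hk, this])]
      rw [insertBy_str k _ hk (fun s hs => hStr s ((PySem.List.sorted_perm _ _ _).mem_iff.mp hs))]

-- ===== VERDICT (by name: the statement is the Claim_ definition above) =====
theorem sort_dict_keys_spec : Claim_equal_sort_dict_keys := by
  intro d _
  unfold Spec_sort_dict_keys sort_dict_keys sort_dict_keys_alt
  simp only [main_order]
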